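-- pv_equiv track=rewrite | github.com/clue-deng/neuromesh | task_2.py | parentheses_inspection
-- ===== SOURCE A (Python) =====
-- def parentheses_inspection(lines):
--     # 用来记录每条线的括号情况
--     output_list = []
--     # 巡视每条线
--     for line in lines:
--         # 添加每一条原先的line
--         output_list.append(line)
--         # 只添加左括号的index位置到list里，然后根据匹配的右括号次数消除
--         # 剩下的index会是没有被匹配到的左括号
--         left = []
--         # 只添加右括号的list
--         right = []
--         # 在每一条line生成的结果，最后会放到output里
--         result_line = list(line)
--
--         # 在每条线中巡视每个字符，查看是否有匹配括号
--         for i in range((len(line))):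
--             if line[i] == '(':
--                 left.append(i)  # 左括号的index
--             elif line[i] == ')':
--                 if left:  # 左括号list不为空
--                     left.pop()  # 匹配到一个左括号，弹出
--                 else:  # 为空，表示右括号多余的空号
--                     right.append(i)  # 记录多余的右括号位置
--
--         # 建造
--         for elem in left:
--             result_line[elem] = 'x'
--         for elem in right:
--             result_line[elem] = '?'
--         for i in range(len(result_line)):
--             # 把不是？或x的变成空格
--             if result_line[i] != '?' and result_line[i] != 'x':
--                 result_line[i] = ' '
--
--         # 添加建造后的结果
--         output_list.append(''.join(result_line))
--     return output_list
-- ===== SOURCE B (Python) =====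
-- def parentheses_inspection(lines):
--     output_list = []
--     for line in lines:
--         output_list.append(line)
--         # stamp markers into a working copy of the line:
--         # a left-to-right balance counter decides every ')',
--         # a right-to-left pending-close counter decides every '('
--         marks = list(line)
--         bal = 0
--         for i, c in enumerate(line):
--             if c == '(':
--                 bal += 1
--             elif c == ')':
--                 if bal:
--                     bal -= 1
--                 else:
--                     marks[i] = '?'
--         pending = 0
--         for i in reversed(range(len(line))):
--             c = line[i]
--             if c == ')':
--                 pending += 1
--             elif c == '(':
--                 if pending:
--                     pending -= 1
--                 else:
--                     marks[i] = 'x'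
--         # keep only marker characters, blank everything else
--         output_list.append(''.join(m if m in '?x' else ' ' for m in marks))
--     return output_list
-- ===== Notes on version B (the rewrite author's own statement) =====
-- stated objective: alternative
-- what changed: Replaces A's index-stack plus stored index lists plus separate marking loops by two directional counter passes that stamp the markers into a copy of the line: a left-to-right balance counter decides every ')', a right-to-left pending-close counter decides every '(', then non-marker characters are blanked in one join.
import Mathlib
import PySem

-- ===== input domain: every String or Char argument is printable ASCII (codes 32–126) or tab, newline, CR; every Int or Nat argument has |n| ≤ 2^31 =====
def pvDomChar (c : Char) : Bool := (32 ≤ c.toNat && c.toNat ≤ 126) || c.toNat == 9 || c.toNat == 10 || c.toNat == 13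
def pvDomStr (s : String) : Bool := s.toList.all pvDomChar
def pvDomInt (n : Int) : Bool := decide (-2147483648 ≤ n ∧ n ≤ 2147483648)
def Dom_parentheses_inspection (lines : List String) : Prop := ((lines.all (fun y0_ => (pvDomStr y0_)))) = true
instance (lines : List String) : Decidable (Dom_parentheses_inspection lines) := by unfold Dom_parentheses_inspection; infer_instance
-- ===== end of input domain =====

-- B replaces A's index-stack and stored index lists by two directional counter passes that
-- stamp the markers into a copy of the line (alternative decomposition, same cost).

-- ===== PORT A =====
-- inner loop state: (left = stack of '(' indices, right = list of unmatched ')' indices)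
def pvAStep (l : List Char) (st : List Nat × List Nat) (i : Nat) : List Nat × List Nat :=
  if l.getD i ' ' = '(' then (st.1 ++ [i], st.2)
  else if l.getD i ' ' = ')' then
    if st.1 ≠ [] then (st.1.dropLast, st.2) else (st.1, st.2 ++ [i])
  else st

def pvALine (s : String) : String :=
  let l := s.toList
  let st := (List.range l.length).foldl (pvAStep l) ([], [])
  let r1 := st.1.foldl (fun r e => r.set e 'x') l
  let r2 := st.2.foldl (fun r e => r.set e '?') r1
  -- final index loop writes each position independently from its own value: ported as map
  String.mk (r2.map (fun c => if c ≠ '?' ∧ c ≠ 'x' then ' ' else c))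

def parentheses_inspection (lines : List String) : List String :=
  lines.foldl (fun out line => out ++ [line, pvALine line]) []

-- ===== PORT B =====
-- forward pass over enumerate(line): balance counter decides every ')'
def pvBFwdStep (st : Int × List Char) (p : Int × Char) : Int × List Char :=
  if p.2 = '(' then (st.1 + 1, st.2)
  else if p.2 = ')' then
    (if st.1 ≠ 0 then (st.1 - 1, st.2) else (st.1, st.2.set p.1.toNat '?'))
  else st

-- backward pass over reversed(range(len(line))): pending-close counter decides every '('
def pvBBwdStep (l : List Char) (st : Int × List Char) (i : Nat) : Int × List Char :=
  let c := l.getD i ' '   -- line[i]; i ranges over range(len(line)), so in range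
  if c = ')' then (st.1 + 1, st.2)
  else if c = '(' then
    (if st.1 ≠ 0 then (st.1 - 1, st.2) else (st.1, st.2.set i 'x'))
  else st

def pvBLine (s : String) : String :=
  let l := s.toList
  let m1 := ((PySem.List.enumerate l 0).foldl pvBFwdStep (0, l)).2
  let m2 := ((List.range l.length).reverse.foldl (pvBBwdStep l) (0, m1)).2
  String.mk (m2.map (fun m => if m = '?' ∨ m = 'x' then m else ' '))

def parentheses_inspection_alt (lines : List String) : List String :=
  lines.foldl (fun out line => out ++ [line, pvBLine line]) []

-- ===== PRECONDITION & SPEC =====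
def Spec_parentheses_inspection (lines : List String) (out : List String) : Prop := out = parentheses_inspection_alt lines
instance (lines : List String) (out : List String) : Decidable (Spec_parentheses_inspection lines out) := by unfold Spec_parentheses_inspection; infer_instance

-- ===== CLAIM (what is proved, stated in full; the proofs are below) =====
def Claim_equal_parentheses_inspection : Prop := ∀ (lines : List String), Dom_parentheses_inspection lines → Spec_parentheses_inspection lines (parentheses_inspection lines)

-- ===== LEMMAS AND PROOFS =====

-- indices of unmatched ')' in a string (in increasing order)
def pvV : List Char → List Nat
  | [] => []
  | c :: t =>
    if c = ')' then 0 :: (pvV t).map (· + 1)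
    else if c = '(' then ((pvV t).drop 1).map (· + 1)
    else (pvV t).map (· + 1)

-- indices of unmatched '(' in a string (in increasing order)
def pvO : List Char → List Nat
  | [] => []
  | c :: t =>
    if c = '(' then (if pvV t = [] then 0 :: (pvO t).map (· + 1) else (pvO t).map (· + 1))
    else (pvO t).map (· + 1)

-- value of a pending-close counter after scanning t left-to-right? No: B's counter over a suffix
def pvCC : List Char → Int → Int
  | [], k => k
  | c :: t, k =>
    if c = ')' then pvCC t k + 1
    else if c = '(' then (if pvCC t k > 0 then pvCC t k - 1 else pvCC t k)
    else pvCC t k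

-- balance counter after B's forward pass
def pvBal : List Char → Int → Int
  | [], b => b
  | c :: t, b =>
    if c = '(' then pvBal t (b + 1)
    else if c = ')' then (if b ≠ 0 then pvBal t (b - 1) else pvBal t b)
    else pvBal t b

theorem pvCC_eq_length_V (t : List Char) : pvCC t 0 = ((pvV t).length : Int) := by
  induction t with
  | nil => simp [pvCC, pvV]
  | cons c t ih =>
    simp only [pvCC, pvV]
    split_ifs with h1 h2 <;> simp [ih] <;> omega

theorem pvV_mem (t : List Char) (i : Nat) (h : i ∈ pvV t) : i < t.length ∧ t.getD i ' ' = ')' := by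
  induction t generalizing i with
  | nil => simp [pvV] at h
  | cons c t ih =>
    simp only [pvV] at h
    have step : ∀ j, j ∈ pvV t → (j + 1) < (c :: t).length ∧ (c :: t).getD (j + 1) ' ' = ')' := by
      intro j hj
      have := ih j hj
      exact ⟨by simp; omega, by simpa using this.2⟩
    split_ifs at h with h1 h2
    · simp only [List.mem_cons, List.mem_map] at h
      rcases h with rfl | ⟨j, hj, rfl⟩
      · exact ⟨by simp, by simp [h1]⟩
      · exact step j hj
    · simp only [List.mem_map] at h
      obtain ⟨j, hj, rfl⟩ := h
      exact step j (List.mem_of_mem_drop hj)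
    · simp only [List.mem_map] at h
      obtain ⟨j, hj, rfl⟩ := h
      exact step j hj

theorem pvO_mem (t : List Char) (i : Nat) :
    i ∈ pvO t ↔ (i < t.length ∧ t.getD i ' ' = '(' ∧ pvV (t.drop (i + 1)) = []) := by
  induction t generalizing i with
  | nil => simp [pvO]
  | cons c t ih =>
    simp only [pvO]
    match i with
    | 0 =>
      split_ifs with h1 h2 <;>
        simp_all [List.mem_map]
    | i + 1 =>
      split_ifs with h1 h2 <;>
        simp_all [List.mem_map]

theorem pvShift (X : List Nat) (k : Nat) : (X.map (· + 1)).map (· + k) = X.map (· + (k + 1)) := by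
  simp only [List.map_map]
  apply List.map_congr_left
  intro a _
  simp [Function.comp]
  omega

theorem pvV_close (t : List Char) : pvV (')' :: t) = 0 :: (pvV t).map (· + 1) := by
  simp [pvV]

theorem pvV_open (t : List Char) : pvV ('(' :: t) = ((pvV t).drop 1).map (· + 1) := by
  simp [pvV]

theorem pvV_other (c : Char) (t : List Char) (h1 : ¬c = '(') (h2 : ¬c = ')') :
    pvV (c :: t) = (pvV t).map (· + 1) := by
  simp [pvV, h1, h2]

theorem pvO_open (t : List Char) :
    pvO ('(' :: t) = if pvV t = [] then 0 :: (pvO t).map (· + 1) else (pvO t).map (· + 1) := by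
  simp [pvO]

theorem pvO_notopen (c : Char) (t : List Char) (h1 : ¬c = '(') :
    pvO (c :: t) = (pvO t).map (· + 1) := by
  simp [pvO, h1]

theorem pvA_fold (l : List Char) (t : List Char) (k : Nat) (ht : l.drop k = t)
    (left right : List Nat) :
    (List.range' k t.length).foldl (pvAStep l) (left, right) =
      (left.take (left.length - (pvV t).length) ++ (pvO t).map (· + k),
       right ++ ((pvV t).drop left.length).map (· + k)) := by
  induction t generalizing k left right with
  | nil => simp [pvV, pvO]
  | cons c t ih =>
    have hk : k < l.length := by
      have h1 : (l.drop k).length = t.length + 1 := by rw [ht]; simp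
      simp only [List.length_drop] at h1
      omega
    have hc : l[k]? = some c := by
      rw [List.getElem?_eq_getElem hk]
      have h0 : (l.drop k)[0]'(by rw [ht]; simp) = c := by simp [ht]
      simpa using h0
    have ht' : l.drop (k + 1) = t := by
      have h2 := congrArg List.tail ht
      simpa [List.tail_drop] using h2
    show (List.range' k (t.length + 1)).foldl (pvAStep l) (left, right) = _
    rw [List.range'_succ, List.foldl_cons]
    by_cases hpar : c = '('
    · subst hpar
      have hstep : pvAStep l (left, right) k = (left ++ [k], right) := by
        simp [pvAStep, List.getD, hc]
      rw [hstep, ih (k + 1) ht' (left ++ [k]) right]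
      rw [pvV_open, pvO_open]
      by_cases hv : pvV t = []
      · rw [if_pos hv]
        simp only [hv, Prod.mk.injEq, List.length_append, List.drop_nil,
          List.map_nil, List.length_nil, List.map_cons]
        refine ⟨?_, ?_⟩
        · rw [List.take_of_length_le (by simp), List.take_of_length_le (by simp), pvShift]
          simp
        · simp
      · rw [if_neg hv]
        simp only [Prod.mk.injEq, List.length_append, List.length_map,
          List.length_drop, List.length_singleton]
        have hvlen : 1 ≤ (pvV t).length := List.length_pos_iff.mpr hv
        refine ⟨?_, ?_⟩
        · rw [List.take_append_of_le_length (by omega), pvShift]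
          congr 2
          omega
        · simp only [List.map_drop, List.drop_drop, pvShift]
          congr 2
          omega
    · by_cases hcl : c = ')'
      · subst hcl
        by_cases hleft : left = []
        · subst hleft
          have hstep : pvAStep l (([] : List Nat), right) k = ([], right ++ [k]) := by
            simp [pvAStep, List.getD, hc]
          rw [hstep, ih (k + 1) ht' [] (right ++ [k])]
          rw [pvV_close, pvO_notopen _ _ (by decide)]
          simp
          exact ⟨fun a _ => by omega, fun a _ => by omega⟩
        · have hstep : pvAStep l (left, right) k = (left.dropLast, right) := by
            simp [pvAStep, List.getD, hc, hleft]
          rw [hstep, ih (k + 1) ht' left.dropLast right]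
          obtain ⟨m, hm⟩ : ∃ m, left.length = m + 1 := by
            cases left with
            | nil => exact absurd rfl hleft
            | cons a l0 => exact ⟨l0.length, by simp⟩
          rw [pvV_close, pvO_notopen _ _ (by decide)]
          simp only [Prod.mk.injEq, List.length_dropLast, List.length_cons, List.length_map, hm]
          refine ⟨?_, ?_⟩
          · rw [List.dropLast_eq_take, List.take_take, pvShift]
            congr 2
            simp [hm]
          · simp only [List.drop_succ_cons, List.map_drop, pvShift, Nat.add_sub_cancel]
      · have hstep : pvAStep l (left, right) k = (left, right) := by
          simp [pvAStep, List.getD, hc, hpar, hcl]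
        rw [hstep, ih (k + 1) ht' left right]
        rw [pvV_other c t hpar hcl, pvO_notopen c t hpar]
        simp only [Prod.mk.injEq, List.length_map]
        refine ⟨?_, ?_⟩
        · rw [pvShift]
        · simp only [List.map_drop, pvShift]

theorem pvA_fold_nil (l : List Char) :
    (List.range l.length).foldl (pvAStep l) ([], []) = (pvO l, pvV l) := by
  rw [List.range_eq_range', pvA_fold l l 0 (by simp) [] []]
  simp

theorem pvSet_length (ps : List Nat) (r : List Char) (c : Char) :
    (ps.foldl (fun r e => r.set e c) r).length = r.length := by
  induction ps generalizing r with
  | nil => rfl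
  | cons p ps ih => simp [ih]

theorem pvSet_getD (ps : List Nat) (r : List Char) (c : Char) (i : Nat) (d : Char) :
    (ps.foldl (fun r e => r.set e c) r).getD i d =
      if i ∈ ps ∧ i < r.length then c else r.getD i d := by
  induction ps generalizing r with
  | nil => simp
  | cons p ps ih =>
    rw [List.foldl_cons, ih]
    by_cases hmem : i ∈ ps
    · simp [hmem]
      split_ifs with h
      · rfl
      · rw [List.getElem?_eq_none (by simp; omega), List.getElem?_eq_none (by omega)]
    · by_cases hip : i = p
      · subst hip
        by_cases hlen : i < r.length
        · simp [hmem, hlen]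
        · simp [hmem, hlen]
      · simp [hmem, hip]
        rw [List.getElem?_set_ne (by omega)]

-- forward pass = stamp '?' at the unmatched-close positions not cancelled by the entry balance
theorem pvDropShift0 (V : List Nat) (b k : Nat) :
    List.map (fun x => x + k) (List.drop b (List.map (fun x => x + 1) V)) =
    List.map (fun x => x + (k + 1)) (List.drop b V) := by
  rw [← List.map_drop, pvShift]

theorem pvFwd_spec (t : List Char) (k : Nat) (bal : Int) (hb : 0 ≤ bal) (m : List Char) :
    (PySem.List.enumerate t (k : Int)).foldl pvBFwdStep (bal, m) =
      (pvBal t bal,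
       ((((pvV t).drop bal.toNat).map (· + k)).foldl (fun r e => r.set e '?') m)) := by
  induction t generalizing k bal m with
  | nil => simp [PySem.List.enumerate_nil, pvBal, pvV]
  | cons c t ih =>
    rw [PySem.List.enumerate_cons, List.foldl_cons]
    have hk1 : ((k : Int) + 1) = ((k + 1 : Nat) : Int) := by push_cast; ring
    by_cases h1 : c = '('
    · subst h1
      have hstep : pvBFwdStep (bal, m) ((k : Int), '(') = (bal + 1, m) := by
        simp [pvBFwdStep]
      rw [hstep, hk1, ih (k + 1) (bal + 1) (by omega) m]
      rw [pvV_open]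
      have hbal : pvBal ('(' :: t) bal = pvBal t (bal + 1) := by simp [pvBal]
      rw [hbal]
      congr 1
      have ht : (bal + 1).toNat = bal.toNat + 1 := by omega
      rw [ht, ← List.map_drop, pvShift, List.drop_drop, Nat.add_comm 1 bal.toNat]
    · by_cases h2 : c = ')'
      · subst h2
        by_cases hz : bal = 0
        · subst hz
          have hstep : pvBFwdStep (0, m) ((k : Int), ')') = (0, m.set k '?') := by
            simp [pvBFwdStep]
          rw [hstep, hk1, ih (k + 1) 0 le_rfl (m.set k '?')]
          rw [pvV_close]
          have hbal : pvBal (')' :: t) 0 = pvBal t 0 := by simp [pvBal]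
          rw [hbal]
          congr 1
          rw [Int.toNat_zero, List.drop_zero, List.drop_zero, List.map_cons, pvShift,
            List.foldl_cons]
          norm_num
        · have hpos : 0 < bal := lt_of_le_of_ne hb (Ne.symm hz)
          have hstep : pvBFwdStep (bal, m) ((k : Int), ')') = (bal - 1, m) := by
            simp [pvBFwdStep, hz]
          rw [hstep, hk1, ih (k + 1) (bal - 1) (by omega) m]
          rw [pvV_close]
          have hbal : pvBal (')' :: t) bal = pvBal t (bal - 1) := by simp [pvBal, hz]
          rw [hbal]
          congr 1
          obtain ⟨b, hb'⟩ : ∃ b, bal.toNat = b + 1 := ⟨(bal - 1).toNat, by omega⟩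
          have hbm : (bal - 1).toNat = b := by omega
          rw [hb', hbm, List.drop_succ_cons, pvDropShift0]
      · have hstep : pvBFwdStep (bal, m) ((k : Int), c) = (bal, m) := by
          simp [pvBFwdStep, h1, h2]
        rw [hstep, hk1, ih (k + 1) bal hb m]
        rw [pvV_other c t h1 h2]
        have hbal : pvBal (c :: t) bal = pvBal t bal := by simp [pvBal, h1, h2]
        rw [hbal]
        congr 1
        rw [pvDropShift0]

theorem pvCC_nonneg (t : List Char) : 0 ≤ pvCC t 0 := by
  rw [pvCC_eq_length_V]
  positivity

-- backward pass = stamp 'x' at the '(' positions below n whose suffix has no unmatched ')'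
theorem pvBwd_spec (l : List Char) (n : Nat) (hn : n ≤ l.length) (m : List Char) :
    (List.range n).reverse.foldl (pvBBwdStep l) (pvCC (l.drop n) 0, m) =
      (pvCC l 0,
       (((List.range n).reverse.filter
          (fun i => decide (l.getD i ' ' = '(') && decide (pvCC (l.drop (i + 1)) 0 = 0))).foldl
         (fun r e => r.set e 'x') m)) := by
  induction n generalizing m with
  | zero => simp
  | succ n ih =>
    have hn' : n ≤ l.length := by omega
    have hlt : n < l.length := by omega
    have hdr : l.drop n = l[n] :: l.drop (n + 1) := by
      rw [List.drop_eq_getElem_cons hlt]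
    have hrev : (List.range (n + 1)).reverse = n :: (List.range n).reverse := by
      rw [List.range_succ, List.reverse_append]
      simp
    rw [hrev, List.foldl_cons, List.filter_cons]
    have hget : l.getD n ' ' = l[n] := List.getD_eq_getElem l ' ' hlt
    have hq : l[n]? = some l[n] := List.getElem?_eq_getElem hlt
    by_cases h1 : l[n] = ')'
    · have hcc : pvCC (l.drop n) 0 = pvCC (l.drop (n + 1)) 0 + 1 := by
        rw [hdr, h1]; simp [pvCC]
      have hstep : pvBBwdStep l (pvCC (l.drop (n + 1)) 0, m) n = (pvCC (l.drop n) 0, m) := by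
        rw [hcc]; simp [pvBBwdStep, List.getD, hq, h1]
      rw [hstep, ih hn' m]
      have hf : (decide (l.getD n ' ' = '(') && decide (pvCC (l.drop (n + 1)) 0 = 0)) = false := by
        simp [List.getD, hq, h1]
      rw [hf]
      simp
    · by_cases h2 : l[n] = '('
      · by_cases hz : pvCC (l.drop (n + 1)) 0 = 0
        · have hcc : pvCC (l.drop n) 0 = pvCC (l.drop (n + 1)) 0 := by
            rw [hdr, h2]; simp [pvCC, hz]
          have hstep : pvBBwdStep l (pvCC (l.drop (n + 1)) 0, m) n =
              (pvCC (l.drop n) 0, m.set n 'x') := by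
            rw [hcc]; simp [pvBBwdStep, List.getD, hq, h2, hz]
          rw [hstep, ih hn' (m.set n 'x')]
          have hf : (decide (l.getD n ' ' = '(') && decide (pvCC (l.drop (n + 1)) 0 = 0)) = true := by
            simp [List.getD, hq, h2, hz]
          rw [hf]
          simp
        · have hpos : 0 < pvCC (l.drop (n + 1)) 0 :=
            lt_of_le_of_ne (pvCC_nonneg _) (Ne.symm hz)
          have hcc : pvCC (l.drop n) 0 = pvCC (l.drop (n + 1)) 0 - 1 := by
            rw [hdr, h2]; simp [pvCC, hpos]
          have hstep : pvBBwdStep l (pvCC (l.drop (n + 1)) 0, m) n = (pvCC (l.drop n) 0, m) := by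
            rw [hcc]; simp [pvBBwdStep, List.getD, hq, h2, hz]
          rw [hstep, ih hn' m]
          have hf : (decide (l.getD n ' ' = '(') && decide (pvCC (l.drop (n + 1)) 0 = 0)) = false := by
            simp [List.getD, hq, hz]
          rw [hf]
          simp
      · have hcc : pvCC (l.drop n) 0 = pvCC (l.drop (n + 1)) 0 := by
          rw [hdr]; simp [pvCC, h1, h2]
        have hstep : pvBBwdStep l (pvCC (l.drop (n + 1)) 0, m) n = (pvCC (l.drop n) 0, m) := by
          rw [hcc]; simp [pvBBwdStep, List.getD, hq, h1, h2]
        rw [hstep, ih hn' m]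
        have hf : (decide (l.getD n ' ' = '(') && decide (pvCC (l.drop (n + 1)) 0 = 0)) = false := by
          simp [List.getD, hq, h2]
        rw [hf]
        simp

theorem pvLine_eq (s : String) : pvALine s = pvBLine s := by
  unfold pvALine pvBLine
  simp only [pvA_fold_nil]
  apply congrArg
  set l := s.toList with hl
  have hfwd := pvFwd_spec l 0 0 le_rfl l
  simp only [Nat.cast_zero, Int.toNat_zero, List.drop_zero] at hfwd
  have hm1 : (List.foldl pvBFwdStep (0, l) (PySem.List.enumerate l 0)).2 =
      List.foldl (fun r e => r.set e '?') l ((pvV l).map (fun x => x + 0)) := by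
    rw [hfwd]
  have hstart : pvCC (l.drop l.length) 0 = 0 := by simp [pvCC]
  have hbwd := pvBwd_spec l l.length le_rfl
    ((List.foldl pvBFwdStep (0, l) (PySem.List.enumerate l 0)).2)
  rw [hstart] at hbwd
  have hm2 : (List.foldl (pvBBwdStep l)
      (0, (List.foldl pvBFwdStep (0, l) (PySem.List.enumerate l 0)).2)
      (List.range l.length).reverse).2 =
      List.foldl (fun r e => r.set e 'x')
        (List.foldl pvBFwdStep (0, l) (PySem.List.enumerate l 0)).2
        (List.filter (fun i => decide (l.getD i ' ' = '(') && decide (pvCC (l.drop (i + 1)) 0 = 0))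
          (List.range l.length).reverse) := by
    rw [hbwd]
  rw [hm2, hm1]
  have hr1 : ((pvO l).foldl (fun r e => r.set e 'x') l).length = l.length := pvSet_length _ _ _
  have hr2 : ((pvV l).foldl (fun r e => r.set e '?')
      ((pvO l).foldl (fun r e => r.set e 'x') l)).length = l.length := by
    rw [pvSet_length]; exact hr1
  have hb1 : (List.foldl (fun r e => r.set e '?') l ((pvV l).map (fun x => x + 0))).length
      = l.length := pvSet_length _ _ _
  apply List.ext_getElem
  · simp only [List.length_map]
    rw [hr2, pvSet_length, hb1]
  intro i hi1 hi2
  have hin : i < l.length := by simpa [hr2] using hi1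
  rw [List.getElem_map, List.getElem_map,
    ← List.getD_eq_getElem _ ' ' (by simpa [hr2] using hin),
    ← List.getD_eq_getElem _ ' ' (by rw [pvSet_length, hb1]; exact hin)]
  rw [pvSet_getD, pvSet_getD, pvSet_getD, pvSet_getD]
  have hmemO : (i ∈ (List.range l.length).reverse.filter
      (fun j => decide (l.getD j ' ' = '(') && decide (pvCC (l.drop (j + 1)) 0 = 0))) ↔
      i ∈ pvO l := by
    rw [List.mem_filter, List.mem_reverse, List.mem_range, pvO_mem]
    constructor
    · rintro ⟨hj, hc⟩
      simp only [Bool.and_eq_true, decide_eq_true_eq] at hc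
      refine ⟨hj, hc.1, ?_⟩
      have hv := pvCC_eq_length_V (l.drop (i + 1))
      rw [hc.2] at hv
      have hlen0 : (pvV (l.drop (i + 1))).length = 0 := by omega
      exact List.eq_nil_of_length_eq_zero hlen0
    · rintro ⟨hj, hc, hv⟩
      refine ⟨hj, ?_⟩
      simp only [Bool.and_eq_true, decide_eq_true_eq]
      exact ⟨hc, by rw [pvCC_eq_length_V, hv]; simp⟩
  have hmemV0 : (i ∈ (pvV l).map (fun x => x + 0)) ↔ i ∈ pvV l := by
    simp
  rw [List.getD_eq_getElem l ' ' hin]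
  simp only [hr1, hb1, hmemO, hmemV0]
  have hgd : l.getD i ' ' = l[i]'hin := List.getD_eq_getElem l ' ' hin
  by_cases hpar : l[i]'hin = '('
  · have hnV : i ∉ pvV l := fun h => by
      have h2 := (pvV_mem l i h).2
      rw [hgd, hpar] at h2
      exact absurd h2 (by decide)
    by_cases hO : i ∈ pvO l
    · simp [hnV, hO, hin]
    · simp [hnV, hO, hin, hpar]
  · have hiO : i ∉ pvO l := fun h => by
      have h2 := ((pvO_mem l i).mp h).2.1
      rw [hgd] at h2
      exact hpar h2
    by_cases hV : i ∈ pvV l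
    · simp [hV, hiO, hin]
    · by_cases hx : l[i]'hin = 'x' ∨ l[i]'hin = '?'
      · rcases hx with hx | hx <;> simp [hV, hiO, hin, hx]
      · rw [not_or] at hx
        simp [hV, hiO, hin, hx.1, hx.2]

-- ===== VERDICT (by name: the statement is the Claim_ definition above) =====
theorem parentheses_inspection_spec : Claim_equal_parentheses_inspection := by
  intro lines _
  unfold Spec_parentheses_inspection parentheses_inspection parentheses_inspection_alt
  simp [pvLine_eq]
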